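-- pv_equiv track=rewrite | github.com/MichaelKarabinosh/CustomAdventV2 | CustomAdventOptimized.py | generate_relative_list
-- ===== SOURCE A (Python) =====
-- def generate_relative_list(pattern):
--     rel_list = []
--     length_y = len(pattern)
--     length_x = len(pattern[0])
--     for y in range(length_y):
--         for x in range(length_x):
--             if pattern[y][x] == "W":
--                 start_y = y
--                 start_x = x
--
--
--     for y in range(length_y):
--         for x in range(length_x):
--             if pattern[y][x] == "1":
--                 rel_list.append((y - start_y, x - start_x))
--     return rel_list
-- ===== SOURCE B (Python) =====
-- def generate_relative_list(pattern):
--     length_x = len(pattern[0])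
--     positions = []
--     for y, row in enumerate(pattern):
--         for x in range(length_x):
--             c = row[x]
--             if c == "W":
--                 start_y, start_x = y, x
--             elif c == "1":
--                 positions.append((y, x))
--     return [(y - start_y, x - start_x) for (y, x) in positions]
-- ===== Notes on version B (the rewrite author's own statement) =====
-- stated objective: simpler
-- what changed: Replaces A's two full nested scans (one for the origin, one appending already-shifted offsets) by a single enumerate pass that records the last 'W' and collects absolute '1' coordinates, shifting them afterwards in one comprehension; one pass instead of two.
import Mathlib
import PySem

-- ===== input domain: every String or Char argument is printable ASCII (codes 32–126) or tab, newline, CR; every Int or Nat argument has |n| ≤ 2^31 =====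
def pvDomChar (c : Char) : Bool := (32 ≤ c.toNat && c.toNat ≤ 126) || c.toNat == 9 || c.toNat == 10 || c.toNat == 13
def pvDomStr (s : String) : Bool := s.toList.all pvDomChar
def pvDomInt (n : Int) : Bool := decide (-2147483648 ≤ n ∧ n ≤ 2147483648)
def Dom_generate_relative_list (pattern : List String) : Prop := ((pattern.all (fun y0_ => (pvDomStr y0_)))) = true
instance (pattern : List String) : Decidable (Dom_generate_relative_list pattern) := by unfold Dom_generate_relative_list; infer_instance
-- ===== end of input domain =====

-- B fuses A's two nested scans into one enumerate pass collecting the origin and the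
-- absolute '1' coordinates, shifting them afterwards; objective: simpler (one pass).

-- ===== PORT A =====
-- pattern[y][x] as A reads it (y always in range under the loops; x may be out of range,
-- which Python raises on — excluded by Pre_; 'none' marks that case)
def pvCharA (pattern : List String) (y x : Int) : Option Char :=
  PySem.Str.pyGet? (PySem.List.pyGetD pattern y "") x

def generate_relative_list (pattern : List String) : List (Int × Int) :=
  let length_y : Int := pattern.length
  let length_x : Int := PySem.Str.len (PySem.List.pyGetD pattern 0 "")
  -- first double loop: start_y/start_x overwritten on every 'W' (unbound = none; Pre_
  -- guarantees it is bound before it is read, so the getD default is never observed)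
  let start : Option (Int × Int) :=
    (PySem.List.pyRange 0 length_y 1).foldl (fun st y =>
      (PySem.List.pyRange 0 length_x 1).foldl (fun st x =>
        if pvCharA pattern y x = some 'W' then some (y, x) else st) st) none
  let s := start.getD (0, 0)
  -- second double loop: append the shifted coordinates of every '1'
  (PySem.List.pyRange 0 length_y 1).foldl (fun acc y =>
    (PySem.List.pyRange 0 length_x 1).foldl (fun acc x =>
      if pvCharA pattern y x = some '1' then acc ++ [(y - s.1, x - s.2)] else acc) acc) []

-- ===== PORT B =====
def generate_relative_list_alt (pattern : List String) : List (Int × Int) :=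
  let length_x : Int := PySem.Str.len (PySem.List.pyGetD pattern 0 "")
  -- single pass over enumerate(pattern): track last 'W' (origin) and collect '1' cells
  let st :=
    (PySem.List.enumerate pattern 0).foldl (fun st yr =>
      (PySem.List.pyRange 0 length_x 1).foldl (fun st x =>
        let c := PySem.Str.pyGet? yr.2 x
        if c = some 'W' then (some (yr.1, x), st.2)
        else if c = some '1' then (st.1, st.2 ++ [(yr.1, x)])
        else st) st)
      ((none : Option (Int × Int)), ([] : List (Int × Int)))
  let o := st.1.getD (0, 0)
  st.2.map (fun p => (p.1 - o.1, p.2 - o.2))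

-- ===== PRECONDITION & SPEC =====
-- Pre_ excludes exactly the inputs where Python A raises: the empty grid (IndexError on
-- pattern[0]), a row shorter than row 0 (IndexError), and a grid with a '1' but no 'W'
-- in the scanned region (NameError: start_y/start_x unbound).
def Pre_generate_relative_list (pattern : List String) : Prop :=
  pattern ≠ [] ∧
  (∀ row ∈ pattern, (pattern.headD "").toList.length ≤ row.toList.length) ∧
  ((∃ row ∈ pattern, 'W' ∈ row.toList.take (pattern.headD "").toList.length) ∨
   (∀ row ∈ pattern, '1' ∉ row.toList.take (pattern.headD "").toList.length))
instance (pattern : List String) : Decidable (Pre_generate_relative_list pattern) := by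
  unfold Pre_generate_relative_list; infer_instance
def pvWitness_generate_relative_list : List String := ["1W", "11"]

def Spec_generate_relative_list (pattern : List String) (out : List (Int × Int)) : Prop := out = generate_relative_list_alt pattern
instance (pattern : List String) (out : List (Int × Int)) : Decidable (Spec_generate_relative_list pattern out) := by unfold Spec_generate_relative_list; infer_instance

-- ===== CLAIM (what is proved, stated in full; the proofs are below) =====
def Claim_equal_generate_relative_list : Prop := ∀ (pattern : List String), Dom_generate_relative_list pattern → Pre_generate_relative_list pattern → Spec_generate_relative_list pattern (generate_relative_list pattern)

-- ===== LEMMAS AND PROOFS =====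

-- a foldl whose step acts componentwise on a pair splits into two independent foldls
theorem foldl_prod_split {sg tg al : Type} (u : sg → al → sg) (v : tg → al → tg)
    (l : List al) (s : sg) (t : tg) :
    l.foldl (fun st a => (u st.1 a, v st.2 a)) (s, t) = (l.foldl u s, l.foldl v t) := by
  induction l generalizing s t with
  | nil => rfl
  | cons a l ih => simpa using ih (u s a) (v t a)

-- B's single pass splits into an origin fold and a positions fold
-- ('W' and '1' are distinct characters, so the two component updates never interfere)
theorem b_nested_split (r : Int → String) (lx : Int) (l : List Int)
    (s0 : Option (Int × Int)) (t0 : List (Int × Int)) :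
    l.foldl (fun st j => (PySem.List.pyRange 0 lx 1).foldl (fun st x =>
        if PySem.Str.pyGet? (r j) x = some 'W' then (some (j, x), st.2)
        else if PySem.Str.pyGet? (r j) x = some '1' then (st.1, st.2 ++ [(j, x)])
        else st) st) (s0, t0)
    = (l.foldl (fun s j => (PySem.List.pyRange 0 lx 1).foldl (fun s x =>
         if PySem.Str.pyGet? (r j) x = some 'W' then some (j, x) else s) s) s0,
       l.foldl (fun t j => (PySem.List.pyRange 0 lx 1).foldl (fun t x =>
         if PySem.Str.pyGet? (r j) x = some '1' then t ++ [(j, x)] else t) t) t0) := by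
  have hstep : ∀ (j : Int) (st : Option (Int × Int) × List (Int × Int)),
      (PySem.List.pyRange 0 lx 1).foldl (fun st x =>
        if PySem.Str.pyGet? (r j) x = some 'W' then (some (j, x), st.2)
        else if PySem.Str.pyGet? (r j) x = some '1' then (st.1, st.2 ++ [(j, x)])
        else st) st
      = ((PySem.List.pyRange 0 lx 1).foldl (fun s x =>
           if PySem.Str.pyGet? (r j) x = some 'W' then some (j, x) else s) st.1,
         (PySem.List.pyRange 0 lx 1).foldl (fun t x =>
           if PySem.Str.pyGet? (r j) x = some '1' then t ++ [(j, x)] else t) st.2) := by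
    intro j st
    have hfun : (fun (st : Option (Int × Int) × List (Int × Int)) (x : Int) =>
        if PySem.Str.pyGet? (r j) x = some 'W' then ((some (j, x) : Option (Int × Int)), st.2)
        else if PySem.Str.pyGet? (r j) x = some '1' then (st.1, st.2 ++ [(j, x)])
        else st)
      = (fun st x => ((if PySem.Str.pyGet? (r j) x = some 'W' then some (j, x) else st.1),
                      (if PySem.Str.pyGet? (r j) x = some '1' then st.2 ++ [(j, x)] else st.2))) := by
      funext st x
      by_cases hW : PySem.Str.pyGet? (r j) x = some 'W' <;>
        by_cases h1 : PySem.Str.pyGet? (r j) x = some '1' <;> simp_all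
    rw [hfun]
    obtain ⟨s, t⟩ := st
    exact foldl_prod_split
      (fun s x => if PySem.Str.pyGet? (r j) x = some 'W' then some (j, x) else s)
      (fun t x => if PySem.Str.pyGet? (r j) x = some '1' then t ++ [(j, x)] else t)
      (PySem.List.pyRange 0 lx 1) s t
  induction l generalizing s0 t0 with
  | nil => rfl
  | cons j l ih => rw [List.foldl_cons, hstep]; exact ih _ _

-- appending already-shifted pairs is the same as collecting the pairs and mapping the shift
theorem append_shift_eq_map (g : Int → Int → Option Char) (lx : Int)
    (f : Int × Int → Int × Int) (l : List Int) :
    l.foldl (fun acc j => (PySem.List.pyRange 0 lx 1).foldl (fun acc x =>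
        if g j x = some '1' then acc ++ [f (j, x)] else acc) acc) []
    = (l.foldl (fun acc j => (PySem.List.pyRange 0 lx 1).foldl (fun acc x =>
        if g j x = some '1' then acc ++ [(j, x)] else acc) acc) []).map f := by
  simp only [PySem.List.foldl_append_ite, PySem.List.foldl_append_eq_flatMap]
  simp [List.map_flatMap, Function.comp_def]

-- append_shift_eq_map specialised to the shift by a fixed origin O
theorem append_shift_origin (g : Int → Int → Option Char) (lx : Int) (l : List Int)
    (O : Int × Int) :
    l.foldl (fun acc j => (PySem.List.pyRange 0 lx 1).foldl (fun acc x =>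
        if g j x = some '1' then acc ++ [(j - O.1, x - O.2)] else acc) acc) []
    = (l.foldl (fun acc j => (PySem.List.pyRange 0 lx 1).foldl (fun acc x =>
        if g j x = some '1' then acc ++ [(j, x)] else acc) acc) []).map
        (fun p => (p.1 - O.1, p.2 - O.2)) :=
  append_shift_eq_map g lx (fun p => (p.1 - O.1, p.2 - O.2)) l

-- the two ports agree on every input
theorem ab_eq (pattern : List String) :
    generate_relative_list pattern = generate_relative_list_alt pattern := by
  simp only [generate_relative_list, generate_relative_list_alt, pvCharA]
  rw [PySem.List.enumerate_eq_map_pyRange pattern "", List.foldl_map]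
  simp only [PySem.List.len_eq]
  rw [b_nested_split (fun j => PySem.List.pyGetD pattern j "")]
  dsimp only
  exact append_shift_origin _ _ _ _

-- ===== VERDICT (by name: the statement is the Claim_ definition above) =====
theorem generate_relative_list_spec : Claim_equal_generate_relative_list := by
  intro pattern _ _
  unfold Spec_generate_relative_list
  exact ab_eq pattern
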